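-- pv_equiv track=rewrite | github.com/1000Rym/CodeSkillUp | coding_test/dynamic_programming/q33_resignation.py | solution
-- ===== SOURCE A (Python) =====
-- def solution(info):
--     benifits = [0]*len(info)
--
--     for i in range(len(info)):
--         for j in range(i):
--             day = info[j][0]
--             pay = info[j][1]
--
--             if i-j-day>=0:
--                 benifits[i] = max(pay + benifits[j], benifits[i])
--
--     return benifits
-- ===== SOURCE B (Python) =====
-- def solution(info):
--     # Single forward sweep: each job j becomes "available" at index j + max(1, day_j);
--     # bucket its candidate value there and maintain a running maximum.
--     n = len(info)
--     benifits = [0] * n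
--     buckets = [[] for _ in range(n)]
--     running = 0
--     for i in range(n):
--         for cand in buckets[i]:
--             if cand > running:
--                 running = cand
--         benifits[i] = running
--         if i + 1 < n:
--             a = i + max(1, info[i][0])
--             if a < n:
--                 buckets[a].append(info[i][1] + running)
--     return benifits
-- ===== Notes on version B (the rewrite author's own statement) =====
-- stated objective: faster
-- what changed: Replaces A's O(n^2) double loop (for each i, scan all j<i for applicable jobs) by a single O(n) sweep that drops each job's payoff into a bucket at the first index where it becomes applicable and maintains a running maximum.
import Mathlib
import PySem

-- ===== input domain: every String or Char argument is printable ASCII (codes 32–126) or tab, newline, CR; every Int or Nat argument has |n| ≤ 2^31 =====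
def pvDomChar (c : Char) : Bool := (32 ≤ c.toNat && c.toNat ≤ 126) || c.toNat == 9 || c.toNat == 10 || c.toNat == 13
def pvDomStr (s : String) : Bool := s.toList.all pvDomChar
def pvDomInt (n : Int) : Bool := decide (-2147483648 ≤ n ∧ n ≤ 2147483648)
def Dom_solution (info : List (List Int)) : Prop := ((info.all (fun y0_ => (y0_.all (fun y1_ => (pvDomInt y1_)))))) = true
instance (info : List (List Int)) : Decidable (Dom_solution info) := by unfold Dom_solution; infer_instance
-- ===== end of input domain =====

-- B replaces A's O(n^2) double loop by a single sweep that buckets each job's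
-- payoff at the first index where it becomes available and maintains a running maximum.

-- ===== PORT A =====
-- Literal port of A's nested loops; pyGetD is exact here because Pre_solution
-- guarantees every row accessed has at least 2 entries and all list indices are in range.
def solution (info : List (List Int)) : List Int :=
  (PySem.List.pyRange 0 (info.length : Int) 1).foldl (fun ben i =>
    (PySem.List.pyRange 0 i 1).foldl (fun ben j =>
      let day := PySem.List.pyGetD (PySem.List.pyGetD info j []) 0 0
      let pay := PySem.List.pyGetD (PySem.List.pyGetD info j []) 1 0
      if i - j - day ≥ 0 then
        PySem.List.pySetD ben i (max (pay + PySem.List.pyGetD ben j 0) (PySem.List.pyGetD ben i 0))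
      else ben) ben)
    (List.replicate info.length 0)

-- ===== PORT B =====
-- Literal port of Source B: state is (benifits, buckets, running); one pass over range(n).
def solution_alt (info : List (List Int)) : List Int :=
  ((PySem.List.pyRange 0 (info.length : Int) 1).foldl (fun s i =>
    let running := (PySem.List.pyGetD s.2.1 i []).foldl
      (fun r cand => if cand > r then cand else r) s.2.2
    let ben := PySem.List.pySetD s.1 i running
    if i + 1 < (info.length : Int) then
      let a := i + max 1 (PySem.List.pyGetD (PySem.List.pyGetD info i []) 0 0)
      if a < (info.length : Int) then
        (ben, PySem.List.pySetD s.2.1 a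
          ((PySem.List.pyGetD s.2.1 a []) ++
            [PySem.List.pyGetD (PySem.List.pyGetD info i []) 1 0 + running]), running)
      else (ben, s.2.1, running)
    else (ben, s.2.1, running))
    (List.replicate info.length (0 : Int), List.replicate info.length ([] : List Int), (0 : Int))).1

-- ===== PRECONDITION & SPEC =====
-- Pre_ excludes exactly the inputs on which A raises IndexError: some row other
-- than the last has fewer than 2 entries (A reads info[j][0] and info[j][1] for every j < len-1).
def Pre_solution (info : List (List Int)) : Prop :=
  ∀ r ∈ info.dropLast, 2 ≤ r.length
instance (info : List (List Int)) : Decidable (Pre_solution info) := by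
  unfold Pre_solution; infer_instance

def pvWitness_solution : List (List Int) := ([[1, 2], [2, 5], [1, 3], [4, 7]])

def Spec_solution (info : List (List Int)) (out : List Int) : Prop := out = solution_alt info
instance (info : List (List Int)) (out : List Int) : Decidable (Spec_solution info out) := by
  unfold Spec_solution; infer_instance

-- ===== CLAIM (what is proved, stated in full; the proofs are below) =====
def Claim_equal_solution : Prop := ∀ (info : List (List Int)), Dom_solution info → Pre_solution info → Spec_solution info (solution info)

-- ===== LEMMAS AND PROOFS =====

-- day / pay fields as both ports read them (default 0 on short rows; ports agree regardless)
def dayN (info : List (List Int)) (j : Nat) : Int := (info.getD j []).getD 0 0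
def payN (info : List (List Int)) (j : Nat) : Int := (info.getD j []).getD 1 0
-- first index at which job j's payoff is available
def actI (info : List (List Int)) (j : Nat) : Int := (j : Int) + max 1 (dayN info j)

-- reference DP value at index i given the previous entries
def dpStep (info : List (List Int)) (prev : List Int) (i : Nat) : Int :=
  (List.range i).foldl (fun acc (j : Nat) =>
    if (i : Int) - (j : Int) - dayN info j ≥ 0 then max (payN info j + prev.getD j 0) acc else acc) 0

def dp (info : List (List Int)) : Nat → List Int
  | 0 => []
  | i + 1 => dp info i ++ [dpStep info (dp info i) i]

def dpv (info : List (List Int)) (i : Nat) : Int := dpStep info (dp info i) i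

-- candidate value contributed by job j
def candV (info : List (List Int)) (j : Nat) : Int := payN info j + dpv info j

-- running maximum entering iteration i of B's sweep
def runR (info : List (List Int)) (i : Nat) : Int :=
  (List.range i).foldl (fun a j => if actI info j < (i : Int) then max (candV info j) a else a) 0

-- contents of bucket t after i iterations
def bContents (info : List (List Int)) (i t : Nat) : List Int :=
  ((List.range i).filter (fun j => actI info j = (t : Int))).map (candV info)

theorem dp_length (info : List (List Int)) (i : Nat) : (dp info i).length = i := by
  induction i with
  | zero => rfl
  | succ i ih => simp [dp, ih]

theorem getD_append_lt (D P : List Int) (j : Nat) (d : Int) (h : j < D.length) :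
    (D ++ P).getD j d = D.getD j d := by
  simp [List.getD, List.getElem?_append_left h]

theorem getD_append_len (D P : List Int) (v d : Int) (j : Nat) (h : D.length = j) :
    (D ++ v :: P).getD j d = v := by
  subst h; simp [List.getD]

theorem set_append_len (D P : List Int) (v w : Int) (j : Nat) (h : D.length = j) :
    (D ++ v :: P).set j w = D ++ w :: P := by
  subst h
  induction D with
  | nil => rfl
  | cons x D ih => simp [ih]

theorem dp_getD (info : List (List Int)) (i j : Nat) (h : j < i) :
    (dp info i).getD j 0 = dpv info j := by
  induction i with
  | zero => omega
  | succ i ih =>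
    show (dp info i ++ [dpStep info (dp info i) i]).getD j 0 = dpv info j
    rcases Nat.lt_or_ge j i with hj | hj
    · rw [getD_append_lt _ _ _ _ (by rw [dp_length]; exact hj)]
      exact ih hj
    · have hji : j = i := by omega
      subst hji
      rw [getD_append_len _ _ _ _ _ (dp_length info j)]
      rfl

theorem dpv_act (info : List (List Int)) (i : Nat) :
    dpv info i = (List.range i).foldl
      (fun a j => if actI info j ≤ (i : Int) then max (candV info j) a else a) 0 := by
  show dpStep info (dp info i) i = _
  unfold dpStep
  apply PySem.List.foldl_congr_mem'
  intro j hj acc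
  have hji : j < i := List.mem_range.mp hj
  have hcond : ((i : Int) - (j : Int) - dayN info j ≥ 0) = (actI info j ≤ (i : Int)) := by
    unfold actI
    have hlt : (j : Int) < (i : Int) := by exact_mod_cast hji
    rcases max_cases 1 (dayN info j) with ⟨h1, h2⟩ | ⟨h1, h2⟩ <;> rw [h1] <;>
      exact propext ⟨fun h => by omega, fun h => by omega⟩
  rw [dp_getD info i j hji]
  simp only [hcond]
  rfl

theorem foldl_if_max_init (L : List Nat) (q : Nat → Prop) [DecidablePred q] (c : Nat → Int) (v x : Int) :
    L.foldl (fun a j => if q j then max (c j) a else a) (max v x)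
      = max (L.foldl (fun a j => if q j then max (c j) a else a) v) x := by
  induction L generalizing v with
  | nil => rfl
  | cons j L ih =>
    by_cases h : q j
    · simp only [List.foldl_cons, h, if_true]
      rw [show max (c j) (max v x) = max (max (c j) v) x from (max_assoc _ _ _).symm, ih]
    · simp only [List.foldl_cons, h, if_false]
      exact ih v

theorem foldl_split (L : List Nat) (p : Nat → Int) (c : Nat → Int) (i : Int) (v : Int) :
    L.foldl (fun a j => if p j ≤ i then max (c j) a else a) v
      = ((L.filter (fun j => p j = i)).map c).foldl (fun r x => max r x)
          (L.foldl (fun a j => if p j < i then max (c j) a else a) v) := by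
  induction L generalizing v with
  | nil => rfl
  | cons j L ih =>
    simp only [List.foldl_cons, List.filter_cons]
    rcases lt_trichotomy (p j) i with h | h | h
    · have hne : decide (p j = i) = false := by simp [ne_of_lt h]
      rw [if_pos (le_of_lt h), if_pos h, hne]
      simp only [Bool.false_eq_true, if_false]
      exact ih (max (c j) v)
    · have hnlt : ¬ p j < i := by omega
      have heq : decide (p j = i) = true := by simp [h]
      rw [if_pos (le_of_eq h), if_neg hnlt, heq]
      simp only [if_true, List.map_cons, List.foldl_cons]
      rw [ih (max (c j) v), max_comm (c j) v,
        foldl_if_max_init L (fun j => p j < i) c v (c j)]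
    · have hne : decide (p j = i) = false := by simp [show ¬ p j = i by omega]
      rw [if_neg (show ¬ p j ≤ i by omega), if_neg (show ¬ p j < i by omega), hne]
      simp only [Bool.false_eq_true, if_false]
      exact ih v

theorem innerA_gen (info : List (List Int)) (D P : List Int) (i : Nat) (hD : D.length = i)
    (L : List Nat) (hL : ∀ j ∈ L, j < i) (v : Int) :
    L.foldl (fun ben (j : Nat) =>
        let day := PySem.List.pyGetD (PySem.List.pyGetD info (j : Int) []) 0 0
        let pay := PySem.List.pyGetD (PySem.List.pyGetD info (j : Int) []) 1 0
        if (i : Int) - (j : Int) - day ≥ 0 then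
          PySem.List.pySetD ben (i : Int) (max (pay + PySem.List.pyGetD ben (j : Int) 0) (PySem.List.pyGetD ben (i : Int) 0))
        else ben) (D ++ v :: P)
      = D ++ (L.foldl (fun acc (j : Nat) =>
          if (i : Int) - (j : Int) - dayN info j ≥ 0 then max (payN info j + D.getD j 0) acc else acc) v) :: P := by
  induction L generalizing v with
  | nil => rfl
  | cons j L ih =>
    have hj : j < i := hL j (List.mem_cons_self)
    simp only [List.foldl_cons]
    rw [show PySem.List.pyGetD (D ++ v :: P) (j : Int) 0 = D.getD j 0 by
          rw [PySem.List.pyGetD_natCast, getD_append_lt _ _ _ _ (by omega : j < D.length)],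
        show PySem.List.pyGetD (D ++ v :: P) (i : Int) 0 = v from by
          rw [PySem.List.pyGetD_natCast, getD_append_len _ _ _ _ _ hD],
        show PySem.List.pyGetD info (j : Int) [] = info.getD j [] from PySem.List.pyGetD_natCast _ _ _,
        PySem.List.pyGetD_ofNat', PySem.List.pyGetD_ofNat']
    by_cases hc : (i : Int) - (j : Int) - (info.getD j []).getD 0 0 ≥ 0
    · rw [if_pos hc, if_pos (show (i : Int) - (j : Int) - dayN info j ≥ 0 from hc)]
      rw [show PySem.List.pySetD (D ++ v :: P) (i : Int)
            (max ((info.getD j []).getD 1 0 + D.getD j 0) v) = D ++ (max (payN info j + D.getD j 0) v) :: P by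
          rw [PySem.List.pySetD_natCast, set_append_len _ _ _ _ _ hD]; rfl]
      exact ih (fun x hx => hL x (List.mem_cons_of_mem _ hx)) _
    · rw [if_neg hc, if_neg (show ¬ (i : Int) - (j : Int) - dayN info j ≥ 0 from hc)]
      exact ih (fun x hx => hL x (List.mem_cons_of_mem _ hx)) v

theorem invA (info : List (List Int)) (i : Nat) (h : i ≤ info.length) :
    (PySem.List.pyRange 0 (i : Int) 1).foldl (fun ben i =>
      (PySem.List.pyRange 0 i 1).foldl (fun ben j =>
        let day := PySem.List.pyGetD (PySem.List.pyGetD info j []) 0 0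
        let pay := PySem.List.pyGetD (PySem.List.pyGetD info j []) 1 0
        if i - j - day ≥ 0 then
          PySem.List.pySetD ben i (max (pay + PySem.List.pyGetD ben j 0) (PySem.List.pyGetD ben i 0))
        else ben) ben)
      (List.replicate info.length 0)
    = dp info i ++ List.replicate (info.length - i) 0 := by
  induction i with
  | zero => simp [dp, PySem.List.pyRange_one_eq_nil]
  | succ i ih =>
    rw [show ((i + 1 : Nat) : Int) = (i : Int) + 1 by push_cast; ring,
      PySem.List.pyRange_one_succ_right (by positivity), List.foldl_append, ih (by omega)]
    simp only [List.foldl_cons, List.foldl_nil]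
    rw [show List.replicate (info.length - i) (0 : Int)
          = 0 :: List.replicate (info.length - (i + 1)) 0 by
        rw [show info.length - i = (info.length - (i + 1)) + 1 by omega, List.replicate_succ]]
    rw [PySem.List.pyRange_zero_natCast i, List.foldl_map]
    rw [show (List.range i).foldl _ (dp info i ++ (0 : Int) :: List.replicate (info.length - (i + 1)) 0)
          = dp info i ++ ((List.range i).foldl (fun acc (j : Nat) =>
              if (i : Int) - (j : Int) - dayN info j ≥ 0 then max (payN info j + (dp info i).getD j 0) acc else acc) 0)
            :: List.replicate (info.length - (i + 1)) 0
        from innerA_gen info (dp info i) (List.replicate (info.length - (i + 1)) 0) i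
          (dp_length info i) (List.range i) (fun j hj => List.mem_range.mp hj) 0]
    show _ = (dp info i ++ [dpStep info (dp info i) i]) ++ _
    rw [List.append_assoc]
    rfl

theorem foldl_gtstep_eq_max (xs : List Int) (v : Int) :
    xs.foldl (fun r x => if x > r then x else r) v = xs.foldl (fun r x => max r x) v := by
  apply PySem.List.foldl_congr_mem'
  intro x _ acc
  by_cases h : x > acc
  · rw [if_pos h, max_eq_right h.le]
  · rw [if_neg h, max_eq_left (by omega)]

theorem act_ge (info : List (List Int)) (i : Nat) : (i : Int) + 1 ≤ actI info i := by
  unfold actI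
  have := le_max_left 1 (dayN info i)
  omega

theorem runR_succ (info : List (List Int)) (i : Nat) :
    runR info (i + 1) = (List.range i).foldl
      (fun a j => if actI info j ≤ (i : Int) then max (candV info j) a else a) 0 := by
  unfold runR
  rw [List.range_succ, List.foldl_append]
  simp only [List.foldl_cons, List.foldl_nil]
  rw [if_neg (show ¬ actI info i < ((i + 1 : Nat) : Int) by
    have := act_ge info i; push_cast; omega)]
  apply PySem.List.foldl_congr_mem'
  intro j hj acc
  have : (actI info j < ((i + 1 : Nat) : Int)) = (actI info j ≤ (i : Int)) := by
    push_cast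
    exact propext ⟨fun h => by omega, fun h => by omega⟩
  simp only [this]

theorem consume (info : List (List Int)) (i : Nat) :
    (bContents info i i).foldl (fun r c => if c > r then c else r) (runR info i) = dpv info i := by
  rw [foldl_gtstep_eq_max, dpv_act]
  exact (foldl_split (List.range i) (actI info) (candV info) (i : Int) 0).symm

theorem bContents_succ (info : List (List Int)) (i t : Nat) :
    bContents info (i + 1) t
      = bContents info i t ++ (if actI info i = (t : Int) then [candV info i] else []) := by
  simp only [bContents, List.range_succ, List.filter_append, List.map_append]
  congr 1
  by_cases h : actI info i = (t : Int) <;> simp [h]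

theorem invB (info : List (List Int)) (i : Nat) (h : i ≤ info.length) :
    ∃ bk : List (List Int),
      (PySem.List.pyRange 0 (i : Int) 1).foldl (fun s i =>
        let running := (PySem.List.pyGetD s.2.1 i []).foldl
          (fun r cand => if cand > r then cand else r) s.2.2
        let ben := PySem.List.pySetD s.1 i running
        if i + 1 < (info.length : Int) then
          let a := i + max 1 (PySem.List.pyGetD (PySem.List.pyGetD info i []) 0 0)
          if a < (info.length : Int) then
            (ben, PySem.List.pySetD s.2.1 a
              ((PySem.List.pyGetD s.2.1 a []) ++
                [PySem.List.pyGetD (PySem.List.pyGetD info i []) 1 0 + running]), running)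
          else (ben, s.2.1, running)
        else (ben, s.2.1, running))
        (List.replicate info.length (0 : Int), List.replicate info.length ([] : List Int), (0 : Int))
      = (dp info i ++ List.replicate (info.length - i) 0, bk, runR info i)
      ∧ bk.length = info.length
      ∧ (∀ t : Nat, i ≤ t → t < info.length → bk.getD t [] = bContents info i t) := by
  induction i with
  | zero =>
    refine ⟨List.replicate info.length [], ?_, by simp, ?_⟩
    · simp [dp, runR, PySem.List.pyRange_one_eq_nil]
    · intro t _ ht
      simp [bContents]
  | succ i ih =>
    obtain ⟨bk, heq, hlen, hbk⟩ := ih (by omega)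
    have hin : i < info.length := by omega
    rw [show ((i + 1 : Nat) : Int) = (i : Int) + 1 by push_cast; ring,
      PySem.List.pyRange_one_succ_right (by positivity), List.foldl_append, heq]
    simp only [List.foldl_cons, List.foldl_nil]
    -- the running value computed this iteration is dpv info i
    have hbki : PySem.List.pyGetD bk (i : Int) [] = bContents info i i := by
      rw [PySem.List.pyGetD_natCast]
      exact hbk i (le_refl i) hin
    have hrun : (PySem.List.pyGetD bk (i : Int) []).foldl
        (fun r cand => if cand > r then cand else r) (runR info i) = dpv info i := by
      rw [hbki]; exact consume info i
    have hrunR : runR info (i + 1) = dpv info i := by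
      rw [runR_succ, dpv_act]
    -- the benefits update
    have hben : PySem.List.pySetD (dp info i ++ List.replicate (info.length - i) 0) (i : Int)
        (dpv info i) = dp info (i + 1) ++ List.replicate (info.length - (i + 1)) 0 := by
      rw [PySem.List.pySetD_natCast,
        show List.replicate (info.length - i) (0 : Int)
            = 0 :: List.replicate (info.length - (i + 1)) 0 by
          rw [show info.length - i = (info.length - (i + 1)) + 1 by omega, List.replicate_succ],
        set_append_len _ _ _ _ _ (dp_length info i)]
      show _ = (dp info i ++ [dpv info i]) ++ _
      rw [List.append_assoc]
      rfl
    -- the activation index read this iteration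
    have hact : (i : Int) + max 1 (PySem.List.pyGetD (PySem.List.pyGetD info (i : Int) []) 0 0)
        = actI info i := by
      rw [PySem.List.pyGetD_natCast, PySem.List.pyGetD_ofNat']
      rfl
    simp only [hrun, hben, hrunR, hact]
    by_cases hc1 : (i : Int) + 1 < (info.length : Int)
    · rw [if_pos hc1]
      by_cases hc2 : actI info i < (info.length : Int)
      · rw [if_pos hc2]
        have hpos : 0 ≤ actI info i := by have := act_ge info i; omega
        set t0 : Nat := (actI info i).toNat with ht0
        have ht0i : (t0 : Int) = actI info i := Int.toNat_of_nonneg hpos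
        have ht0lt : t0 < info.length := by omega
        have ht0ge : i + 1 ≤ t0 := by have := act_ge info i; omega
        have hpay : PySem.List.pyGetD (PySem.List.pyGetD info (i : Int) []) 1 0 = payN info i := by
          rw [PySem.List.pyGetD_natCast, PySem.List.pyGetD_ofNat']
          rfl
        refine ⟨bk.set t0 (bContents info i t0 ++ [candV info i]), ?_, by simp [hlen], ?_⟩
        · rw [show PySem.List.pySetD bk (actI info i)
                ((PySem.List.pyGetD bk (actI info i) []) ++
                  [PySem.List.pyGetD (PySem.List.pyGetD info (i : Int) []) 1 0 + dpv info i])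
              = bk.set t0 (bContents info i t0 ++ [candV info i]) by
            rw [← ht0i, PySem.List.pySetD_natCast, PySem.List.pyGetD_natCast, hpay,
              hbk t0 (by omega) ht0lt]
            rfl]
        · intro t htge htlt
          rw [bContents_succ]
          by_cases hte : t = t0
          · rw [hte, List.getD, List.getElem?_set, if_pos rfl,
              if_pos (show t0 < bk.length by omega), if_pos ht0i.symm]
            rfl
          · have hne : ¬ actI info i = (t : Int) := fun hh => hte (by omega)
            rw [List.getD, List.getElem?_set, if_neg (fun hh => hte hh.symm),
              if_neg hne, List.append_nil]
            exact hbk t (by omega) htlt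
      · rw [if_neg hc2]
        refine ⟨bk, rfl, hlen, ?_⟩
        intro t htge htlt
        have hne : ¬ actI info i = (t : Int) := by
          intro hh
          rw [hh] at hc2
          exact hc2 (by exact_mod_cast htlt)
        rw [bContents_succ, if_neg hne, List.append_nil]
        exact hbk t (by omega) htlt
    · rw [if_neg hc1]
      refine ⟨bk, rfl, hlen, ?_⟩
      intro t htge htlt
      exfalso
      omega

-- ===== VERDICT (by name: the statement is the Claim_ definition above) =====
theorem solution_spec : Claim_equal_solution := by
  intro info _ _
  obtain ⟨bk, hB, _, _⟩ := invB info info.length (le_refl _)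
  unfold Spec_solution solution solution_alt
  rw [invA info info.length (le_refl _), hB]
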